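-- pv_equiv track=rewrite | github.com/DanialHMD/Happy-Numbers | happy_numbers.py | happy_checker
-- ===== SOURCE A (Python) =====
-- def happy_checker(n):
--     nums = set()
--     h = "Happy!"
--     uh = "Unhappy."
--     while n != 1:
--         n = sum(int(i)**2 for i in str(n))
--         if n in nums:
--             return uh
--         nums.add(n)
--     return h
-- ===== SOURCE B (Python) =====
-- def _digit_square_sum(m):
--     s = 0
--     while m > 0:
--         d = m % 10
--         s += d * d
--         m //= 10
--     return s
--
-- def happy_checker(n):
--     if n == 1:
--         return "Happy!"
--     slow, fast = n, _digit_square_sum(n)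
--     while fast != 1 and slow != fast:
--         slow = _digit_square_sum(slow)
--         fast = _digit_square_sum(_digit_square_sum(fast))
--     return "Happy!" if fast == 1 else "Unhappy."
-- ===== Notes on version B (the rewrite author's own statement) =====
-- stated objective: alternative
-- what changed: Replaces A's visited-set cycle detection over string-parsed digit squares by Floyd's tortoise-and-hare cycle detection with a purely arithmetic (% and //) digit-square-sum helper, using O(1) extra space instead of an unbounded set.
import Mathlib
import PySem

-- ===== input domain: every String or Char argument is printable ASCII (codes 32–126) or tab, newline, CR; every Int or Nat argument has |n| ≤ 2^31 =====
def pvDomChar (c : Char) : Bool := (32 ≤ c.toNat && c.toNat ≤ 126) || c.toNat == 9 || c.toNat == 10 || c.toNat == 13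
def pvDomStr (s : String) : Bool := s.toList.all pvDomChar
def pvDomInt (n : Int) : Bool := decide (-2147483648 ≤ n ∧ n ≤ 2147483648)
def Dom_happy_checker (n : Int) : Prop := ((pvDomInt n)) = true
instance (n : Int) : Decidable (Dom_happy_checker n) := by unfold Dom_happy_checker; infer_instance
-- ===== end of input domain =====

-- B replaces A's visited-set cycle detection over string-parsed digit squares by Floyd's
-- tortoise-and-hare with an arithmetic (% and //) digit-square-sum helper (alternative algorithm,
-- O(1) extra space); return values proved equal for all n ≥ 0 in Dom.

-- ===== PORT A =====
-- sum(int(i)**2 for i in str(n)); none = some int(i) raised ValueError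
def pvDigitsSq? : List Char → Option Int
  | [] => some 0
  | c :: cs => (PySem.Int.ofChars? [c]).bind fun v =>
      (pvDigitsSq? cs).map fun r => v ^ 2 + r

def pvStepA (n : Int) : Option Int := pvDigitsSq? (PySem.Int.toChars n)

-- the while loop; fuel is only a totality guard (proved sufficient on Pre_), none = ValueError
def pvLoopA : Nat → Int → PySem.Set Int → Option String
  | 0, _, _ => none
  | f + 1, n, nums =>
    if n = 1 then some "Happy!"
    else
      match pvStepA n with
      | none => none
      | some n' =>
        if n' ∈ nums then some "Unhappy."
        else pvLoopA f n' (PySem.Set.add nums n')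

def happy_checker (n : Int) : String := (pvLoopA 1000 n PySem.Set.empty).getD ""

-- ===== PORT B =====
-- _digit_square_sum's while loop, accumulator style; fuel m.toNat + 1 bounds the iterations
def pvDigsqAux : Nat → Int → Int → Int
  | 0, _, s => s
  | f + 1, m, s =>
    if 0 < m then
      pvDigsqAux f (PySem.Int.floordiv m 10) (s + (PySem.Int.mod m 10) * (PySem.Int.mod m 10))
    else s

def pvDigsq (m : Int) : Int := pvDigsqAux (m.toNat + 1) m 0

-- Floyd's loop; fuel is only a totality guard (proved sufficient on Pre_)
def pvLoopB : Nat → Int → Int → String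
  | 0, _, _ => ""
  | f + 1, slow, fast =>
    if fast = 1 then "Happy!"
    else if slow = fast then "Unhappy."
    else pvLoopB f (pvDigsq slow) (pvDigsq (pvDigsq fast))

def happy_checker_alt (n : Int) : String :=
  if n = 1 then "Happy!" else pvLoopB 1000 n (pvDigsq n)

-- ===== PRECONDITION & SPEC =====
-- Pre_ excludes exactly n < 0, on which A raises ValueError (int('-') on the sign of str(n)).
def Pre_happy_checker (n : Int) : Prop := 0 ≤ n
instance (n : Int) : Decidable (Pre_happy_checker n) := by unfold Pre_happy_checker; infer_instance
def pvWitness_happy_checker : Int := (7)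

def Spec_happy_checker (n : Int) (out : String) : Prop := out = happy_checker_alt n
instance (n : Int) (out : String) : Decidable (Spec_happy_checker n out) := by unfold Spec_happy_checker; infer_instance

-- ===== CLAIM (what is proved, stated in full; the proofs are below) =====
def Claim_equal_happy_checker : Prop := ∀ (n : Int), Dom_happy_checker n → Pre_happy_checker n → Spec_happy_checker n (happy_checker n)

-- ===== LEMMAS AND PROOFS =====

-- the mathematical digit-square-sum
def pvSNat (m : Nat) : Nat := ((Nat.digits 10 m).map (fun d => d * d)).sum

theorem pvLoopA_step (f : Nat) (n n' : Int) (nums : PySem.Set Int)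
    (h1 : ¬ n = 1) (h2 : pvStepA n = some n') :
    pvLoopA (f + 1) n nums =
      if n' ∈ nums then some "Unhappy." else pvLoopA f n' (PySem.Set.add nums n') := by
  simp only [pvLoopA, if_neg h1, h2]

theorem pvLoopB_succ (f : Nat) (slow fast : Int) :
    pvLoopB (f + 1) slow fast =
      if fast = 1 then "Happy!"
      else if slow = fast then "Unhappy."
      else pvLoopB f (pvDigsq slow) (pvDigsq (pvDigsq fast)) := rfl

theorem pvDigsqAux_eq (f : Nat) : ∀ (m : Nat) (s : Int), m < f →
    pvDigsqAux f (m : Int) s = s + (pvSNat m : Int) := by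
  induction f with
  | zero => intro m s h; omega
  | succ f ih =>
    intro m s h
    by_cases hm : 0 < m
    · have hcast : (0 : Int) < (m : Int) := by exact_mod_cast hm
      have hdiv : PySem.Int.floordiv (m : Int) 10 = ((m / 10 : Nat) : Int) := by
        simp only [PySem.Int.floordiv]
        rw [Int.fdiv_eq_ediv]
        omega
      have hmod : PySem.Int.mod (m : Int) 10 = ((m % 10 : Nat) : Int) := by
        simp only [PySem.Int.mod]
        rw [Int.fmod_eq_emod]
        omega
      have hlt : m / 10 < f := by
        have := Nat.div_le_self m 10
        omega
      have hsnat : pvSNat m = m % 10 * (m % 10) + pvSNat (m / 10) := by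
        unfold pvSNat
        rw [Nat.digits_def' (by norm_num : (1:Nat) < 10) hm]
        simp
      simp only [pvDigsqAux, if_pos hcast, hdiv, hmod, ih (m / 10) _ hlt, hsnat]
      push_cast
      ring
    · have hm0 : m = 0 := by omega
      subst hm0
      simp [pvDigsqAux, pvSNat]

theorem pvDigsq_eq (n : Int) (h : 0 ≤ n) : pvDigsq n = (pvSNat n.toNat : Int) := by
  have h1 : ((n.toNat : Int)) = n := Int.toNat_of_nonneg h
  have := pvDigsqAux_eq (n.toNat + 1) n.toNat 0 (by omega)
  rw [h1] at this
  simpa [pvDigsq] using this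

theorem pvSNat_le (m : Nat) (h : m ≤ 2147483648) : pvSNat m ≤ 810 := by
  have hlen : (Nat.digits 10 m).length ≤ 10 :=
    (Nat.digits_length_le_iff (by norm_num) m).mpr (by omega)
  have hsum : ((Nat.digits 10 m).map (fun d => d * d)).sum ≤
      ((Nat.digits 10 m).map (fun d => d * d)).length * 81 := by
    have := List.sum_le_card_nsmul ((Nat.digits 10 m).map (fun d => d * d)) 81 ?_
    · simpa [smul_eq_mul, Nat.mul_comm] using this
    · intro x hx
      simp only [List.mem_map] at hx
      obtain ⟨d, hd, rfl⟩ := hx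
      have : d < 10 := Nat.digits_lt_base (by norm_num) hd
      nlinarith
  unfold pvSNat
  simp only [List.length_map] at hsum
  calc ((Nat.digits 10 m).map (fun d => d * d)).sum
      ≤ (Nat.digits 10 m).length * 81 := hsum
    _ ≤ 10 * 81 := by omega
    _ = 810 := by norm_num

theorem pvToDigitsCore_eq (f : Nat) : ∀ (m : Nat) (acc : List Char), m < f →
    Nat.toDigitsCore 10 f m acc =
      (if m = 0 then ['0'] else ((Nat.digits 10 m).map Nat.digitChar).reverse) ++ acc := by
  induction f with
  | zero => intro m acc h; omega
  | succ f ih =>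
    intro m acc h
    simp only [Nat.toDigitsCore]
    by_cases hq : m / 10 = 0
    · rw [if_pos hq]
      by_cases hm : m = 0
      · subst hm; simp [Nat.digitChar]
      · have hlt10 : m < 10 := by omega
        rw [if_neg hm]
        rw [Nat.digits_def' (by norm_num : (1:Nat) < 10) (by omega), hq]
        simp [Nat.mod_eq_of_lt hlt10]
    · rw [if_neg hq]
      have hm : 0 < m := by omega
      have hlt : m / 10 < f := by
        have := Nat.div_le_self m 10
        have := Nat.div_lt_self hm (by norm_num : 1 < 10)
        omega
      rw [ih (m / 10) _ hlt, if_neg hq]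
      rw [Nat.digits_def' (by norm_num : (1:Nat) < 10) hm]
      rw [if_neg (by omega : ¬ m = 0)]
      simp

theorem pvOfChars_digitChar (d : Nat) (h : d < 10) :
    PySem.Int.ofChars? [Nat.digitChar d] = some (d : Int) := by
  interval_cases d <;> decide

theorem pvDigitsSq?_map (l : List Nat) (h : ∀ d ∈ l, d < 10) :
    pvDigitsSq? (l.map Nat.digitChar) = some (((l.map (fun d => d * d)).sum : Nat) : Int) := by
  induction l with
  | nil => simp [pvDigitsSq?]
  | cons d l ih =>
    have hd : d < 10 := h d (by simp)
    have ihl := ih (fun x hx => h x (by simp [hx]))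
    simp only [List.map_cons, pvDigitsSq?, pvOfChars_digitChar d hd, ihl,
      Option.bind_some, Option.map_some, List.sum_cons]
    push_cast
    ring_nf

theorem pvStepA_eq (n : Int) (h : 0 ≤ n) : pvStepA n = some ((pvSNat n.toNat : Nat) : Int) := by
  have htc : PySem.Int.toChars n = Nat.toDigits 10 n.toNat := by
    simp [PySem.Int.toChars, not_lt.mpr h]
  unfold pvStepA
  rw [htc]
  unfold Nat.toDigits
  rw [pvToDigitsCore_eq (n.toNat + 1) n.toNat [] (by omega)]
  by_cases h0 : n.toNat = 0
  · rw [if_pos h0, h0]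
    decide
  · rw [if_neg h0, List.append_nil]
    have hrev : ((Nat.digits 10 n.toNat).map Nat.digitChar).reverse =
        ((Nat.digits 10 n.toNat).reverse).map Nat.digitChar := by
      simp [List.map_reverse]
    rw [hrev, pvDigitsSq?_map _ (fun d hd => Nat.digits_lt_base (by norm_num)
      (List.mem_reverse.mp hd))]
    unfold pvSNat
    congr 2
    rw [List.map_reverse, List.sum_reverse]

-- A's loop with the digit-square step replaced by the (proved equal on 0 ≤ n) arithmetic one,
-- so the finite table below evaluates without string parsing
def pvLoopA2 : Nat → Int → PySem.Set Int → Option String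
  | 0, _, _ => none
  | f + 1, n, nums =>
    if n = 1 then some "Happy!"
    else
      if pvDigsq n ∈ nums then some "Unhappy."
      else pvLoopA2 f (pvDigsq n) (PySem.Set.add nums (pvDigsq n))

theorem pvDigsq_nonneg (n : Int) (h : 0 ≤ n) : 0 ≤ pvDigsq n := by
  rw [pvDigsq_eq n h]; positivity

theorem pvLoopA2_eq (f : Nat) : ∀ (n : Int) (nums : PySem.Set Int), 0 ≤ n →
    pvLoopA f n nums = pvLoopA2 f n nums := by
  induction f with
  | zero => intro n nums _; rfl
  | succ f ih =>
    intro n nums h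
    by_cases h1 : n = 1
    · simp only [pvLoopA, pvLoopA2, if_pos h1]
    · have hstep : pvStepA n = some (pvDigsq n) := by
        rw [pvStepA_eq n h, pvDigsq_eq n h]
      rw [pvLoopA_step f n _ nums h1 hstep]
      simp only [pvLoopA2, if_neg h1]
      by_cases hmem : pvDigsq n ∈ nums
      · rw [if_pos hmem, if_pos hmem]
      · rw [if_neg hmem, if_neg hmem, ih _ _ (pvDigsq_nonneg n h)]

-- the finite table: from any value m reachable after the first step, A's set loop and B's
-- residual Floyd loop agree (verified by evaluation over all m ≤ 810)
set_option maxHeartbeats 4000000 in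
set_option maxRecDepth 40000 in
theorem pvTable : ∀ m : Nat, m < 811 →
    pvLoopA2 999 (m : Int) (PySem.Set.add PySem.Set.empty (m : Int)) =
      some (if (m : Int) = 1 then "Happy!"
            else if (m : Int) = pvDigsq m then "Unhappy."
            else pvLoopB 999 (m : Int) (pvDigsq (pvDigsq (m : Int)))) := by decide

-- ===== VERDICT (by name: the statement is the Claim_ definition above) =====
theorem happy_checker_spec : Claim_equal_happy_checker := by
  intro n hdom hpre
  unfold Spec_happy_checker
  by_cases h1 : n = 1
  · subst h1; decide
  · have h0 : 0 ≤ n := hpre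
    have hub : n ≤ 2147483648 := by
      unfold Dom_happy_checker pvDomInt at hdom
      simp only [decide_eq_true_eq] at hdom
      omega
    have hkle : pvSNat n.toNat ≤ 810 := pvSNat_le n.toNat (by omega)
    have hstep : pvStepA n = some ((pvSNat n.toNat : Nat) : Int) := pvStepA_eq n h0
    have hdig : pvDigsq n = ((pvSNat n.toNat : Nat) : Int) := pvDigsq_eq n h0
    set k : Nat := pvSNat n.toNat with hk
    have hA : happy_checker n =
        (pvLoopA2 999 (k : Int) (PySem.Set.add PySem.Set.empty (k : Int))).getD "" := by
      unfold happy_checker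
      rw [show (1000 : Nat) = 999 + 1 from rfl,
        pvLoopA_step 999 n _ _ h1 hstep,
        if_neg (by simp [PySem.Set.empty] : ¬ ((k : Int) ∈ PySem.Set.empty)),
        pvLoopA2_eq 999 (k : Int) _ (by positivity)]
    have hB : happy_checker_alt n = if (k : Int) = 1 then "Happy!"
        else if n = (k : Int) then "Unhappy."
        else pvLoopB 999 (k : Int) (pvDigsq (pvDigsq (k : Int))) := by
      unfold happy_checker_alt
      rw [if_neg h1, show (1000 : Nat) = 999 + 1 from rfl, pvLoopB_succ, hdig]
    rw [hA, pvTable k (by omega), Option.getD_some, hB]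
    by_cases hk1 : (k : Int) = 1
    · simp [hk1]
    · rw [if_neg hk1, if_neg hk1]
      by_cases hnk : n = (k : Int)
      · rw [if_pos hnk]
        have hfix : (k : Int) = pvDigsq (k : Int) := by rw [← hnk, hdig, hnk]
        rw [if_pos hfix]
      · rw [if_neg hnk]
        by_cases hfix : (k : Int) = pvDigsq (k : Int)
        · rw [if_pos hfix, ← hfix, ← hfix,
            show (999 : Nat) = 998 + 1 from rfl, pvLoopB_succ,
            if_neg hk1, if_pos rfl]
        · rw [if_neg hfix]
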